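-- pv_equiv track=rewrite | github.com/kindomLee/openclaw-workspace-template | scripts/memory-compress.py | compress_p2_section
-- ===== SOURCE A (Python) =====
-- def compress_p2_section(section: dict):
--     """Compress a P2 block to at most 3 lines + a 'collapsed' marker."""
--     body = section["body"]
--     content_lines = [l for l in body if l.strip() and not l.strip().startswith("<!--")]
--     if len(content_lines) <= 3:
--         return body, False
--
--     new_body: list[str] = []
--     content_count = 0
--     for line in body:
--         if line.strip().startswith("<!--"):
--             new_body.append(line)
--             continue
--         if not line.strip():
--             new_body.append(line)
--             continue
--         content_count += 1
--         if content_count <= 3: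
--             new_body.append(line)
--         elif content_count == 4:
--             new_body.append(f"- *(collapsed {len(content_lines) - 3} detail line(s))*\n")
--             break
--
--     new_body.append("\n")
--     return new_body, True
-- ===== SOURCE B (Python) =====
-- def compress_p2_section(section: dict):
--     """Compress a P2 block to at most 3 lines + a 'collapsed' marker."""
--     body = section["body"]
--
--     def is_content(l):
--         s = l.strip()
--         return bool(s) and not s.startswith("<!--")
--
--     total = sum(map(is_content, body))
--     if total <= 3:
--         return body, False
--     out = []
--     rest = body
--     for _ in range(3):
--         # span: keep everything up to and including the next content line
--         i = next(j for j, l in enumerate(rest) if is_content(l))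
--         out += rest[:i + 1]
--         rest = rest[i + 1:]
--     # keep trailing non-content lines up to (not including) the 4th content line
--     i = next(j for j, l in enumerate(rest) if is_content(l))
--     out += rest[:i]
--     out.append(f"- *(collapsed {total - 3} detail line(s))*\n")
--     out.append("\n")
--     return out, True
-- ===== Notes on version B (the rewrite author's own statement) =====
-- stated objective: alternative
-- what changed: Replaces A's single rebuild loop with counter and break by a count pass plus three span steps (take non-content prefix, then one content line) and a final non-content span before appending the marker.
import Mathlib
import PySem

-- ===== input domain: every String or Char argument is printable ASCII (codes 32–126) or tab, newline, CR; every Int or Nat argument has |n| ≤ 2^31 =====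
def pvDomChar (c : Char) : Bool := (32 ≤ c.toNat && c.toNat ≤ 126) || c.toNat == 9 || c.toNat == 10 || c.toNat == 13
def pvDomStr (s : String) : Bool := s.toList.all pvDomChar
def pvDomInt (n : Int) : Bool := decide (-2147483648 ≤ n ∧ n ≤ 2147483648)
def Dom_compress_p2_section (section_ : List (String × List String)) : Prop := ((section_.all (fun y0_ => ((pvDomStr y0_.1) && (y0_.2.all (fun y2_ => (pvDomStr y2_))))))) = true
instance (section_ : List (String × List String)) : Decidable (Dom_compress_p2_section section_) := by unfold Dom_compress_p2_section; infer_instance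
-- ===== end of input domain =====

-- B replaces A's counting rebuild loop (with break) by a count pass plus three
-- span steps and a final span before the marker: an alternative decomposition, same O(n).

-- ===== PORT A =====
-- condition 'l.strip() and not l.strip().startswith("<!--")' (same text in both Pythons)
def pvIsContent (l : String) : Bool :=
  decide (PySem.Str.strip l ≠ "") && !(PySem.Str.startswith (PySem.Str.strip l) "<!--")

-- A's 'for line in body: …' loop with content_count and break; returns new_body up to the break
def pvLoopA : List String → Nat → String → List String
  | [], _, _ => []
  | l :: rest, cnt, marker =>
    if PySem.Str.startswith (PySem.Str.strip l) "<!--" then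
      l :: pvLoopA rest cnt marker
    else if PySem.Str.strip l == "" then
      l :: pvLoopA rest cnt marker
    else if cnt + 1 ≤ 3 then
      l :: pvLoopA rest (cnt + 1) marker
    else if cnt + 1 == 4 then
      [marker]                                -- append marker, then break
    else
      pvLoopA rest (cnt + 1) marker           -- unreachable in Python, ported faithfully

def compress_p2_section (section_ : List (String × List String)) : List String × Bool :=
  match (PySem.Dict.mk section_).get? "body" with
  | none => ([], false)                        -- Python raises KeyError; excluded by Pre_
  | some body =>
    let content_lines := body.filter pvIsContent
    if content_lines.length ≤ 3 then (body, false)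
    else
      (pvLoopA body 0
        ("- *(collapsed " ++ PySem.Int.toStr ((content_lines.length : Int) - 3) ++ " detail line(s))*\n")
        ++ ["\n"], true)

-- ===== PORT B =====
-- 'i = next(j for j,l in enumerate(rest) if is_content(l)); rest[:i+1] / rest[:i] …'
-- = split rest at its first content line: (non-content prefix, remainder)
def pvSplitB : List String → List String × List String
  | [] => ([], [])                             -- no content line left (unreachable under the guard)
  | l :: rest =>
    if pvIsContent l then ([], l :: rest)
    else
      let (p, r) := pvSplitB rest
      (l :: p, r)

-- B's 'for _ in range(3)' of span steps, then the final non-content span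
def pvTakeB : List String → Nat → List String
  | rest, 0 => (pvSplitB rest).1
  | rest, k + 1 =>
    match pvSplitB rest with
    | (p, []) => p                             -- unreachable under the guard total > 3
    | (p, c :: r) => p ++ c :: pvTakeB r k

def compress_p2_section_alt (section_ : List (String × List String)) : List String × Bool :=
  match (PySem.Dict.mk section_).get? "body" with
  | none => ([], false)                        -- Python raises KeyError; excluded by Pre_
  | some body =>
    let total := body.countP (fun l => pvIsContent l)
    if total ≤ 3 then (body, false)
    else
      (pvTakeB body 3
        ++ ["- *(collapsed " ++ PySem.Int.toStr ((total : Int) - 3) ++ " detail line(s))*\n", "\n"],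
       true)

-- ===== PRECONDITION & SPEC =====
-- Pre_ excludes only inputs without a "body" key, on which Python A raises KeyError.
def Pre_compress_p2_section (section_ : List (String × List String)) : Prop :=
  ((PySem.Dict.mk section_).get? "body").isSome = true
instance (section_ : List (String × List String)) : Decidable (Pre_compress_p2_section section_) := by
  unfold Pre_compress_p2_section; infer_instance

def pvWitness_compress_p2_section : (List (String × List String)) := [("body", ["- a", "- b"])]

def Spec_compress_p2_section (section_ : List (String × List String)) (out : List String × Bool) : Prop := out = compress_p2_section_alt section_
instance (section_ : List (String × List String)) (out : List String × Bool) : Decidable (Spec_compress_p2_section section_ out) := by unfold Spec_compress_p2_section; infer_instance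

-- ===== CLAIM (what is proved, stated in full; the proofs are below) =====
def Claim_equal_compress_p2_section : Prop := ∀ (section_ : List (String × List String)), Dom_compress_p2_section section_ → Pre_compress_p2_section section_ → Spec_compress_p2_section section_ (compress_p2_section section_)

-- ===== LEMMAS AND PROOFS =====

-- a non-content line is appended unchanged by A's loop (comment branch or blank branch)
theorem pvLoopA_not_content (l : String) (rest : List String) (cnt : Nat) (m : String)
    (h : pvIsContent l = false) :
    pvLoopA (l :: rest) cnt m = l :: pvLoopA rest cnt m := by
  unfold pvIsContent at h
  simp only [Bool.and_eq_false_iff, decide_eq_false_iff_not, not_not, Bool.not_eq_false'] at h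
  rcases h with h | h
  · have h1 : PySem.Str.startswith (PySem.Str.strip l) "<!--" = false := by rw [h]; decide
    have h1' : PySem.Chars.startswith (PySem.Chars.strip l.toList) ['<', '!', '-', '-'] = false := by
      simpa using h1
    simp [pvLoopA, h]
  · have h' : PySem.Chars.startswith (PySem.Chars.strip l.toList) ['<', '!', '-', '-'] = true := by
      simpa using h
    simp [pvLoopA, h']

-- B's span keeps a non-content head and continues
theorem pvTakeB_not_content (l : String) (rest : List String) (k : Nat)
    (h : pvIsContent l = false) :
    pvTakeB (l :: rest) k = l :: pvTakeB rest k := by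
  cases k with
  | zero => simp [pvTakeB, pvSplitB, h]
  | succ k =>
    simp only [pvTakeB, pvSplitB, h, Bool.false_eq_true, if_neg, ite_false]
    rcases hs : pvSplitB rest with ⟨p, r⟩
    cases r <;> simp [pvTakeB, hs]

-- A's loop equals B's (3 - cnt) span steps followed by the marker, when enough content lines remain
theorem pvLoopA_eq (body : List String) :
    ∀ (cnt : Nat) (m : String), cnt ≤ 3 → 3 - cnt < (body.filter pvIsContent).length →
    pvLoopA body cnt m = pvTakeB body (3 - cnt) ++ [m] := by
  induction body with
  | nil => intro cnt m _ hlt; simp at hlt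
  | cons l rest ih =>
    intro cnt m hle hlt
    by_cases hc : pvIsContent l = true
    · have hstrip : PySem.Str.strip l ≠ "" ∧
          PySem.Str.startswith (PySem.Str.strip l) "<!--" = false := by
        unfold pvIsContent at hc
        simp only [Bool.and_eq_true, decide_eq_true_eq, Bool.not_eq_true'] at hc
        exact hc
      have hsw : PySem.Chars.startswith (PySem.Chars.strip l.toList) ['<', '!', '-', '-'] = false := by
        simpa using hstrip.2
      have hne : PySem.Str.strip l ≠ "" := hstrip.1
      have hsplit : pvSplitB (l :: rest) = ([], l :: rest) := by simp [pvSplitB, hc]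
      rcases Nat.lt_or_ge cnt 3 with hcnt | hcnt
      · -- content line kept, counter advances
        have hrec : pvLoopA (l :: rest) cnt m = l :: pvLoopA rest (cnt + 1) m := by
          simp [pvLoopA, hsw, hne, hcnt]
        have hk : 3 - cnt = (3 - (cnt + 1)) + 1 := by omega
        have hlen : 3 - (cnt + 1) < (rest.filter pvIsContent).length := by
          rw [List.filter_cons_of_pos hc] at hlt; simp at hlt; omega
        rw [hrec, ih (cnt + 1) m (by omega) hlen, hk]
        simp [pvTakeB, hsplit]
      · -- this is the 4th content line: A appends the marker and breaks; B's step count is 0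
        have hcnt3 : cnt = 3 := by omega
        subst hcnt3
        have hrec : pvLoopA (l :: rest) 3 m = [m] := by
          simp [pvLoopA, hsw, hne]
        simp [hrec, pvTakeB, hsplit]
    · -- non-content line: both sides keep it and continue
      have hcf : pvIsContent l = false := by simpa using hc
      have hlen : 3 - cnt < (rest.filter pvIsContent).length := by
        rw [List.filter_cons_of_neg (by simp [hcf])] at hlt; exact hlt
      rw [pvLoopA_not_content l rest cnt m hcf, pvTakeB_not_content l rest _ hcf,
        ih cnt m hle hlen]
      simp

-- ===== VERDICT (by name: the statement is the Claim_ definition above) =====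
theorem compress_p2_section_spec : Claim_equal_compress_p2_section := by
  intro section_ _hdom hpre
  unfold Spec_compress_p2_section compress_p2_section compress_p2_section_alt
  cases hb : (PySem.Dict.mk section_).get? "body" with
  | none => unfold Pre_compress_p2_section at hpre; rw [hb] at hpre
  | some body =>
    simp only
    have hcount : body.countP (fun l => pvIsContent l) = (body.filter pvIsContent).length :=
      List.countP_eq_length_filter
    by_cases h3 : (body.filter pvIsContent).length ≤ 3
    · rw [if_pos h3, if_pos (by omega)]
    · rw [if_neg h3, if_neg (by omega), hcount,
        pvLoopA_eq body 0 _ (by omega) (by omega), List.append_assoc]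
      rfl
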